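-- pv_equiv track=rewrite | github.com/dkdo1406/Algorithm | codility/2번.py | solution
-- ===== SOURCE A (Python) =====
-- def solution(S, C):
--     temp = S[0]
--     saveIndex = 0
--     answer = 0
--     cnt = 1
--     for index, i in enumerate(S):
--         if index != 0:
--             if i == temp:
--                 cnt += 1
--             else:
--                 if cnt > 1:
--                     answer += sum(C[saveIndex:saveIndex+cnt]) - max((C[saveIndex:saveIndex+cnt]))
--                 temp = i
--                 saveIndex = index
--                 cnt = 1
--     if cnt > 1:
--         answer += sum(C[saveIndex:saveIndex+cnt]) - max((C[saveIndex:saveIndex+cnt]))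
--
--     return answer
-- ===== SOURCE B (Python) =====
-- def solution(S, C):
--     answer = 0
--     run_max = C[0]
--     for i in range(1, len(S)):
--         if S[i] == S[i - 1]:
--             answer += min(run_max, C[i])
--             run_max = max(run_max, C[i])
--         else:
--             run_max = C[i]
--     return answer
-- ===== Notes on version B (the rewrite author's own statement) =====
-- stated objective: simpler
-- what changed: B replaces A's run-grouping with slices, sum() and max() per run by a single left-to-right pass that keeps only the running maximum of the current run and adds min(run_max, C[i]) at each equal-neighbour step (telescoping sum-minus-max), with no slicing or run bookkeeping.
-- outside the precondition, e.g. on solution('aa', [5]): A returns 0, B raises IndexError; on solution('a', []): A returns 0, B raises IndexError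
import Mathlib
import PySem

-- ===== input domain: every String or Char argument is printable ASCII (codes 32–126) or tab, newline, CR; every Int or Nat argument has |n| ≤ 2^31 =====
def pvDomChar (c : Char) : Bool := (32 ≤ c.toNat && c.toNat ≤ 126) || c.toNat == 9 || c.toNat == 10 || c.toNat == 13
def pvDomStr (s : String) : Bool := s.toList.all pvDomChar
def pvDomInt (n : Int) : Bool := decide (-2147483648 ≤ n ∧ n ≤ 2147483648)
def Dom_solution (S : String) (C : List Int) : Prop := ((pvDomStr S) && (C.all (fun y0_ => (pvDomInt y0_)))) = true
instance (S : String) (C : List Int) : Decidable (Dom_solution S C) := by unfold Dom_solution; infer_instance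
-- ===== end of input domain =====

-- B replaces A's per-run slice/sum/max grouping by a single pass keeping only the running
-- maximum of the current run (telescoping sum-minus-max); objective: simpler.


-- ===== PORT A =====
-- sum(C[saveIndex:saveIndex+cnt]) - max(C[saveIndex:saveIndex+cnt])  (max([]) would raise; outside Pre_)
def runCost (C : List Int) (saveIndex cnt : Int) : Int :=
  (PySem.List.slice C (some saveIndex) (some (saveIndex + cnt))).sum
    - (PySem.List.max? (PySem.List.slice C (some saveIndex) (some (saveIndex + cnt))) (fun y => y)).getD 0

-- the final 'if cnt > 1: answer += …' after the loop; state = (temp, saveIndex, answer, cnt)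
def finishA (C : List Int) (st : Char × Int × Int × Int) : Int :=
  if st.2.2.2 > 1 then st.2.2.1 + runCost C st.2.1 st.2.2.2 else st.2.2.1

-- the 'for index, i in enumerate(S)' loop, structural recursion over the enumerate list
def loopA (C : List Int) : List (Int × Char) → (Char × Int × Int × Int) → (Char × Int × Int × Int)
  | [], st => st
  | (index, i) :: rest, (temp, saveIndex, answer, cnt) =>
    if index ≠ 0 then
      if i = temp then
        loopA C rest (temp, saveIndex, answer, cnt + 1)
      else
        loopA C rest (i, index, (if cnt > 1 then answer + runCost C saveIndex cnt else answer), 1)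
    else
      loopA C rest (temp, saveIndex, answer, cnt)

-- S[0] raises IndexError on empty S in Python (excluded by Pre_); the default is never used there
def solution (S : String) (C : List Int) : Int :=
  let temp := (PySem.Str.pyGet? S 0).getD ' '
  finishA C (loopA C (PySem.List.enumerate S.toList 0) (temp, 0, 0, 1))

-- ===== PORT B =====
-- 'for i in range(1, len(S))' comparing S[i] with S[i-1]: recursion over the tail, carrying
-- the previous char; C[i] raises IndexError in Python where pyGet? is none (excluded by Pre_)
def loopB (C : List Int) : List Char → Int → Char → Int → Int → Int
  | [], _, _, answer, _ => answer
  | c :: rest, i, prev, answer, runMax =>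
    let ci := (PySem.List.pyGet? C i).getD 0
    if c = prev then
      loopB C rest (i + 1) c (answer + min runMax ci) (max runMax ci)
    else
      loopB C rest (i + 1) c answer ci

def solution_alt (S : String) (C : List Int) : Int :=
  match S.toList with
  | [] => 0   -- Python: C[0] raises iff C = [] (outside Pre_); otherwise the loop is empty, answer 0
  | c :: rest => loopB C rest 1 c 0 ((PySem.List.pyGet? C 0).getD 0)

-- ===== PRECONDITION & SPEC =====
-- Pre_ excludes empty S, where A raises IndexError at S[0], and C shorter than S, where A
-- returns values computed from silently truncated slices while B's direct C[i] indexing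
-- raises IndexError.
def Pre_solution (S : String) (C : List Int) : Prop :=
  S.toList ≠ [] ∧ S.toList.length ≤ C.length
instance (S : String) (C : List Int) : Decidable (Pre_solution S C) := by
  unfold Pre_solution; infer_instance

def pvWitness_solution : String × List Int := ("ab", [1, 2])

def Spec_solution (S : String) (C : List Int) (out : Int) : Prop := out = solution_alt S C
instance (S : String) (C : List Int) (out : Int) : Decidable (Spec_solution S C out) := by
  unfold Spec_solution; infer_instance

-- ===== CLAIM (what is proved, stated in full; the proofs are below) =====
def Claim_equal_solution : Prop :=
  ∀ (S : String) (C : List Int), Dom_solution S C → Pre_solution S C →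
    Spec_solution S C (solution S C)

-- ===== LEMMAS AND PROOFS =====

-- max(run) with run = (C.drop s).take cnt, characterised by membership + upper bound
lemma runCost_eq (C : List Int) (s cnt : Nat) (runMax : Int)
    (hm : runMax ∈ (C.drop s).take cnt) (hmax : ∀ y ∈ (C.drop s).take cnt, y ≤ runMax) :
    runCost C (s : Int) (cnt : Int) = ((C.drop s).take cnt).sum - runMax := by
  unfold runCost
  rw [PySem.List.slice_natCast_add]
  have hne : (C.drop s).take cnt ≠ [] := by
    intro h; rw [h] at hm; exact (List.not_mem_nil hm)
  rcases h : PySem.List.max? ((C.drop s).take cnt) (fun y => y) with _ | m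
  · exact absurd (Iff.mp (PySem.List.max?_eq_none_iff _ _) h) hne
  · have h1 : m ≤ runMax := hmax m (PySem.List.max?_mem h)
    have h2 : runMax ≤ m := PySem.List.max?_isMax h runMax hm
    simpa using le_antisymm h1 h2

lemma take_one_of_lt (C : List Int) (s : Nat) (h : s < C.length) :
    (C.drop s).take 1 = [C[s]] := by
  rw [List.drop_eq_getElem_cons h]; rfl

lemma take_succ_of_lt (C : List Int) (s cnt : Nat) (h : s + cnt < C.length) :
    (C.drop s).take (cnt + 1) = (C.drop s).take cnt ++ [C[s + cnt]] := by
  rw [List.take_add_one]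
  congr 1
  rw [List.getElem?_drop, List.getElem?_eq_getElem h]
  rfl

lemma ci_eq (C : List Int) (i : Nat) (h : i < C.length) :
    (PySem.List.pyGet? C (i : Int)).getD 0 = C[i] := by
  rw [PySem.List.pyGet?_natCast, List.getElem?_eq_getElem h]
  rfl

lemma loopAB (C : List Int) (rest : List Char) :
    ∀ (s cnt : Nat) (temp : Char) (ansA ansB runMax : Int),
      1 ≤ cnt → s + cnt + rest.length ≤ C.length →
      runMax ∈ (C.drop s).take cnt →
      (∀ y ∈ (C.drop s).take cnt, y ≤ runMax) →
      ansB = ansA + ((C.drop s).take cnt).sum - runMax →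
      finishA C (loopA C (PySem.List.enumerate rest ((s : Int) + (cnt : Int)))
          (temp, (s : Int), ansA, (cnt : Int)))
        = loopB C rest ((s : Int) + (cnt : Int)) temp ansB runMax := by
  induction rest with
  | nil =>
    intro s cnt temp ansA ansB runMax h1 _ hm hmax hans
    simp only [PySem.List.enumerate_nil, loopA, loopB, finishA]
    by_cases hc : (cnt : Int) > 1
    · have : 1 ≤ s + cnt ∧ s + cnt ≤ C.length := by
        constructor <;> omega
      rw [if_pos hc, runCost_eq C s cnt runMax hm hmax]
      omega
    · rw [if_neg hc]
      have hcnt1 : cnt = 1 := by omega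
      subst hcnt1
      have hslen : s < C.length := by omega
      rw [take_one_of_lt C s hslen] at hm hans
      simp at hm hans
      omega
  | cons c rest ih =>
    intro s cnt temp ansA ansB runMax h1 h2 hm hmax hans
    have hi : s + cnt < C.length := by simp at h2; omega
    rw [PySem.List.enumerate_cons]
    simp only [loopA, loopB]
    have hidx : ((s : Int) + (cnt : Int)) ≠ 0 := by
      have : (1 : Int) ≤ (cnt : Int) := by exact_mod_cast h1
      omega
    rw [if_pos hidx]
    have hci : (PySem.List.pyGet? C ((s : Int) + (cnt : Int))).getD 0 = C[s + cnt] := by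
      have : ((s : Int) + (cnt : Int)) = ((s + cnt : Nat) : Int) := by push_cast; ring
      rw [this, ci_eq C (s + cnt) hi]
    by_cases hc : c = temp
    · subst hc
      rw [if_pos rfl, if_pos rfl, hci]
      have hcast : (s : Int) + (cnt : Int) + 1 = (s : Int) + ((cnt + 1 : Nat) : Int) := by
        push_cast; ring
      have hcast' : (cnt : Int) + 1 = ((cnt + 1 : Nat) : Int) := by push_cast; ring
      rw [hcast, hcast']
      apply ih s (cnt + 1) c ansA _ _ (by omega) (by simp at h2 ⊢; omega)
      · rw [take_succ_of_lt C s cnt hi]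
        rcases max_cases runMax C[s + cnt] with ⟨he, _⟩ | ⟨he, _⟩ <;> rw [he]
        · exact List.mem_append_left _ hm
        · exact List.mem_append_right _ (by simp)
      · rw [take_succ_of_lt C s cnt hi]
        intro y hy
        rcases List.mem_append.mp hy with hy | hy
        · exact le_trans (hmax y hy) (le_max_left _ _)
        · simp at hy; subst hy; exact le_max_right _ _
      · rw [take_succ_of_lt C s cnt hi]
        simp only [List.sum_append, List.sum_cons, List.sum_nil]
        have := min_add_max runMax C[s + cnt]
        omega
    · rw [if_neg hc, if_neg hc, hci]
      -- A flushes the finished run; that flushed answer equals ansB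
      have hflush : (if (cnt : Int) > 1 then ansA + runCost C (s : Int) (cnt : Int) else ansA)
          = ansB := by
        by_cases hc1 : (cnt : Int) > 1
        · rw [if_pos hc1, runCost_eq C s cnt runMax hm hmax]; omega
        · rw [if_neg hc1]
          have hcnt1 : cnt = 1 := by omega
          subst hcnt1
          have hslen : s < C.length := by omega
          rw [take_one_of_lt C s hslen] at hm hans
          simp at hm hans
          omega
      rw [hflush]
      have hcast : (s : Int) + (cnt : Int) + 1 = ((s + cnt : Nat) : Int) + ((1 : Nat) : Int) := by
        push_cast; ring
      have hcast2 : ((s : Int) + (cnt : Int)) = ((s + cnt : Nat) : Int) := by push_cast; ring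
      rw [hcast, hcast2]
      apply ih (s + cnt) 1 c ansB _ _ (le_refl 1) (by simp at h2 ⊢; omega)
      · rw [take_one_of_lt C (s + cnt) hi]; simp
      · rw [take_one_of_lt C (s + cnt) hi]; simp
      · rw [take_one_of_lt C (s + cnt) hi]; simp

-- ===== VERDICT (by name: the statement is the Claim_ definition above) =====
theorem solution_spec : Claim_equal_solution := by
  intro S C _ hpre
  obtain ⟨hne, hlen⟩ := hpre
  unfold Spec_solution solution solution_alt
  rcases hS : S.toList with _ | ⟨c, rest⟩
  · exact absurd hS hne
  · rw [hS] at hlen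
    have hClen : 0 < C.length := by simp at hlen; omega
    have htemp : (PySem.Str.pyGet? S 0).getD ' ' = c := by
      have h0 : PySem.Str.pyGet? S ((0 : Nat) : Int) = S.toList[(0 : Nat)]? :=
        PySem.Str.pyGet?_natCast S 0
      simp only [Nat.cast_zero] at h0
      rw [h0, hS]
      rfl
    rw [htemp]
    have henum : PySem.List.enumerate (c :: rest) (0 : Int)
        = (0, c) :: PySem.List.enumerate rest 1 := PySem.List.enumerate_cons c rest 0
    rw [henum]
    simp only [loopA, if_neg (by simp : ¬ ((0 : Int) ≠ 0))]
    have hC0 : (PySem.List.pyGet? C (0 : Int)).getD 0 = C[0] := by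
      have := ci_eq C 0 hClen
      simpa using this
    have main := loopAB C rest 0 1 c 0 0 C[0] (le_refl 1)
      (by simp at hlen ⊢; omega)
      (by rw [take_one_of_lt C 0 hClen]; simp)
      (by rw [take_one_of_lt C 0 hClen]; simp)
      (by rw [take_one_of_lt C 0 hClen]; simp)
    simp only [Nat.cast_zero, Nat.cast_one, zero_add] at main
    rw [main, hC0]
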